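-- pv_equiv track=rewrite | github.com/marekjh/Project-Euler | problems/problem025.py | x_digit_fib_number
-- ===== SOURCE A (Python) =====
-- def x_digit_fib_number(x):
--     a = 1
--     b = 1
--     count = 2
--
--     while True:
--         c = a + b
--         count += 1
--
--         if len(str(c)) == x:
--             return count
--
--         a = b + c
--         count += 1
--
--         if len(str(a)) == x:
--             return count
--
--         b = c + a
--         count += 1
--
--         if len(str(b)) == x:
--             return count
-- ===== SOURCE B (Python) =====
-- def x_digit_fib_number(x):
--     threshold = 10 ** (x - 1)
--
--     def fib_pair(n):
--         # fast doubling: returns (F(n), F(n+1))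
--         if n == 0:
--             return (0, 1)
--         a, b = fib_pair(n >> 1)
--         c = a * (2 * b - a)
--         d = a * a + b * b
--         if n & 1:
--             return (d, c + d)
--         return (c, d)
--
--     hi = 1
--     while fib_pair(hi)[0] < threshold:
--         hi *= 2
--     lo = 0
--     while lo < hi:
--         mid = (lo + hi) // 2
--         if fib_pair(mid)[0] < threshold:
--             lo = mid + 1
--         else:
--             hi = mid
--     return lo
-- ===== Notes on version B (the rewrite author's own statement) =====
-- stated objective: faster
-- what changed: B replaces A's linear walk through every Fibonacci number (with a decimal string conversion at each step) by exponential-then-binary search on the index, evaluating Fibonacci at each probed index from scratch with the fast-doubling recurrence and comparing against the precomputed threshold 10**(x-1); this is correct because Fibonacci is nondecreasing, so 'F(n) >= 10**(x-1)' is a monotone predicate whose least witness is the first x-digit Fibonacci index.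
-- intended difference: For x = 1 A returns 3 because it only starts checking at Fibonacci index 3, while B returns 1: the first Fibonacci number with one digit is F_1 = 1, so index 1 is the intended answer. — e.g. on x_digit_fib_number(1): A returns 3, B returns 1
-- outside the precondition, e.g. on x_digit_fib_number(0): A does not finish within the time limit, B returns 1
import Mathlib
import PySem

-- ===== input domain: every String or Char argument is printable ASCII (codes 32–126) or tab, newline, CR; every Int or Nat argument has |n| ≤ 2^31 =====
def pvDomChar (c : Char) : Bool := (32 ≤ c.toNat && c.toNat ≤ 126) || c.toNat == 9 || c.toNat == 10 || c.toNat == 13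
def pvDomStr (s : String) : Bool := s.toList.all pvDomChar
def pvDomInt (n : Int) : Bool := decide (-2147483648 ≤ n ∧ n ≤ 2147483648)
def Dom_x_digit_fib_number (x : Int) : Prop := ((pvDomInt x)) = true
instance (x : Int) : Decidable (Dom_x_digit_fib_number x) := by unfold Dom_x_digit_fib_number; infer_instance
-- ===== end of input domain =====

-- B replaces A's linear walk through every Fibonacci number (string-converting each one)
-- by exponential-then-binary search on the index, evaluating Fibonacci at each probed
-- index with the fast-doubling recurrence against the threshold 10^(x-1) (objective: faster).

-- ===== PORT A =====
-- A's `while True` is ported as fueled recursion; fuel 3*x.toNat+1 macro-iterations is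
-- proved sufficient on Pre_; 0 on fuel exhaustion is junk, unreachable under Pre_.
def pvLoopA (fuel : Nat) (x a b count : Int) : Int :=
  match fuel with
  | 0 => 0
  | f + 1 =>
    let c := a + b
    let count1 := count + 1
    if PySem.Str.len (PySem.Int.toStr c) = x then count1
    else
      let a2 := b + c
      let count2 := count1 + 1
      if PySem.Str.len (PySem.Int.toStr a2) = x then count2
      else
        let b2 := c + a2
        let count3 := count2 + 1
        if PySem.Str.len (PySem.Int.toStr b2) = x then count3
        else pvLoopA f x a2 b2 count3

def x_digit_fib_number (x : Int) : Int := pvLoopA (3 * x.toNat + 1) x 1 1 2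

-- ===== PORT B =====
-- fib_pair's recursion on n >> 1 and both while loops are ported with explicit fuel
-- (structural recursion); each fuel is proved sufficient on Pre_, the fuel-0 branch is
-- unreachable junk. 10 ** (x - 1) is ported with a Nat exponent, exact on Pre_ (1 ≤ x).
def pvFibPair (fuel n : Nat) : Int × Int :=
  match fuel with
  | 0 => (0, 1)
  | f + 1 =>
    if n = 0 then (0, 1)
    else
      let p := pvFibPair f (n / 2)
      let a := p.1
      let b := p.2
      let c := a * (2 * b - a)
      let d := a * a + b * b
      if n % 2 = 1 then (d, c + d) else (c, d)

def pvGrow (fuel : Nat) (t : Int) (hi : Nat) : Nat :=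
  match fuel with
  | 0 => hi
  | f + 1 => if (pvFibPair (hi + 1) hi).1 < t then pvGrow f t (2 * hi) else hi

def pvBsearch (fuel : Nat) (t : Int) (lo hi : Nat) : Nat :=
  match fuel with
  | 0 => lo
  | f + 1 =>
    if lo < hi then
      let mid := (lo + hi) / 2
      if (pvFibPair (mid + 1) mid).1 < t then pvBsearch f t (mid + 1) hi
      else pvBsearch f t lo mid
    else lo

def x_digit_fib_number_alt (x : Int) : Int :=
  let t := (10 : Int) ^ (x - 1).toNat
  let hi := pvGrow (x.toNat + 4) t 1
  ((pvBsearch (hi + 1) t 0 hi : Nat) : Int)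

-- ===== PRECONDITION & SPEC =====
-- Pre_ excludes x ≤ 0, on which A's `while True` never returns (no Fibonacci number has
-- a non-positive digit count, so A loops forever).
def Pre_x_digit_fib_number (x : Int) : Prop := 1 ≤ x
instance (x : Int) : Decidable (Pre_x_digit_fib_number x) := by unfold Pre_x_digit_fib_number; infer_instance
def pvWitness_x_digit_fib_number : Int := 2

-- For x = 1 A returns 3 because it only starts checking at Fibonacci index 3, while B
-- returns 1: the first Fibonacci number with one digit is F_1 = 1, so 1 is the intended answer.
def D_x_digit_fib_number (x : Int) : Prop := x = 1
instance (x : Int) : Decidable (D_x_digit_fib_number x) := by unfold D_x_digit_fib_number; infer_instance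

def Spec_x_digit_fib_number (x : Int) (out : Int) : Prop := ¬ D_x_digit_fib_number x → out = x_digit_fib_number_alt x
instance (x : Int) (out : Int) : Decidable (Spec_x_digit_fib_number x out) := by unfold Spec_x_digit_fib_number; infer_instance

def pvDiffWitness_x_digit_fib_number : Int := 1
def pvDiffWitnessOut_x_digit_fib_number : Int × Int := (3, 1)

-- ===== CLAIM (what is proved, stated in full; the proofs are below) =====
def Claim_unchanged_x_digit_fib_number : Prop := ∀ (x : Int), Dom_x_digit_fib_number x → Pre_x_digit_fib_number x → Spec_x_digit_fib_number x (x_digit_fib_number x)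
def Claim_changed_x_digit_fib_number : Prop := Dom_x_digit_fib_number (pvDiffWitness_x_digit_fib_number) ∧ Pre_x_digit_fib_number (pvDiffWitness_x_digit_fib_number) ∧ D_x_digit_fib_number (pvDiffWitness_x_digit_fib_number) ∧ x_digit_fib_number (pvDiffWitness_x_digit_fib_number) = pvDiffWitnessOut_x_digit_fib_number.1 ∧ x_digit_fib_number_alt (pvDiffWitness_x_digit_fib_number) = pvDiffWitnessOut_x_digit_fib_number.2 ∧ pvDiffWitnessOut_x_digit_fib_number.1 ≠ pvDiffWitnessOut_x_digit_fib_number.2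
def Claim_exact_x_digit_fib_number : Prop := ∀ (x : Int), Dom_x_digit_fib_number x → Pre_x_digit_fib_number x → D_x_digit_fib_number x → x_digit_fib_number x ≠ x_digit_fib_number_alt x

-- ===== LEMMAS AND PROOFS =====

-- The Fibonacci sequence both programs are about (proof-side only).
def pvFib : Nat → Int
  | 0 => 0
  | 1 => 1
  | n + 2 => pvFib n + pvFib (n + 1)

theorem pvFib_add_two (n : Nat) : pvFib (n + 2) = pvFib n + pvFib (n + 1) := rfl

theorem pvFib_step (n k : Nat) (h : n = k + 2) : pvFib n = pvFib k + pvFib (k + 1) := by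
  subst h; exact pvFib_add_two k

theorem pvFib_eq_fib (n : Nat) : pvFib n = (Nat.fib n : Int) := by
  induction n using Nat.strong_induction_on with
  | _ n ih =>
    match n with
    | 0 => rfl
    | 1 => rfl
    | k + 2 =>
      rw [pvFib_add_two, ih k (by omega), ih (k + 1) (by omega), Nat.fib_add_two]
      push_cast; ring

theorem pvFib_nonneg_pos (n : Nat) : 0 ≤ pvFib n ∧ 1 ≤ pvFib (n + 1) := by
  induction n with
  | zero => exact ⟨le_refl 0, le_refl 1⟩
  | succ n ih =>
    obtain ⟨h0, h1⟩ := ih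
    have h2 := pvFib_step (n + 1 + 1) n (by omega)
    constructor <;> omega

theorem pvFib_pos' (n : Nat) (h : 1 ≤ n) : 1 ≤ pvFib n := by
  obtain ⟨m, rfl⟩ : ∃ m, n = m + 1 := ⟨n - 1, by omega⟩
  exact (pvFib_nonneg_pos m).2

theorem pvFib_mono {m n : Nat} (h : m ≤ n) : pvFib m ≤ pvFib n := by
  rw [pvFib_eq_fib, pvFib_eq_fib]
  exact_mod_cast Nat.fib_mono h

theorem pvFib_add_eight (n : Nat) : pvFib (n + 8) = 21 * pvFib (n + 1) + 13 * pvFib n := by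
  have h2 : pvFib (n + 2) = pvFib n + pvFib (n + 1) := pvFib_add_two n
  have h3 : pvFib (n + 3) = pvFib (n + 1) + pvFib (n + 2) := by
    rw [pvFib_step (n + 3) (n + 1) (by omega), show n + 1 + 1 = n + 2 from by omega]
  have h4 : pvFib (n + 4) = pvFib (n + 2) + pvFib (n + 3) := by
    rw [pvFib_step (n + 4) (n + 2) (by omega), show n + 2 + 1 = n + 3 from by omega]
  have h5 : pvFib (n + 5) = pvFib (n + 3) + pvFib (n + 4) := by
    rw [pvFib_step (n + 5) (n + 3) (by omega), show n + 3 + 1 = n + 4 from by omega]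
  have h6 : pvFib (n + 6) = pvFib (n + 4) + pvFib (n + 5) := by
    rw [pvFib_step (n + 6) (n + 4) (by omega), show n + 4 + 1 = n + 5 from by omega]
  have h7 : pvFib (n + 7) = pvFib (n + 5) + pvFib (n + 6) := by
    rw [pvFib_step (n + 7) (n + 5) (by omega), show n + 5 + 1 = n + 6 from by omega]
  have h8 : pvFib (n + 8) = pvFib (n + 6) + pvFib (n + 7) := by
    rw [pvFib_step (n + 8) (n + 6) (by omega), show n + 6 + 1 = n + 7 from by omega]
  omega

-- Growth: F(8k+1) and F(8k+2) are at least 10^k.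
theorem pvFib_growth (k : Nat) : (10 : Int) ^ k ≤ pvFib (8 * k + 1) ∧ (10 : Int) ^ k ≤ pvFib (8 * k + 2) := by
  induction k with
  | zero => constructor <;> norm_num [pvFib]
  | succ k ih =>
    have g1 : pvFib (8 * k + 9) = 21 * pvFib (8 * k + 2) + 13 * pvFib (8 * k + 1) := by
      have := pvFib_add_eight (8 * k + 1)
      rwa [show 8 * k + 1 + 8 = 8 * k + 9 from by omega, show 8 * k + 1 + 1 = 8 * k + 2 from by omega] at this
    have g2 : pvFib (8 * k + 10) = 21 * pvFib (8 * k + 3) + 13 * pvFib (8 * k + 2) := by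
      have := pvFib_add_eight (8 * k + 2)
      rwa [show 8 * k + 2 + 8 = 8 * k + 10 from by omega, show 8 * k + 2 + 1 = 8 * k + 3 from by omega] at this
    have g3 : pvFib (8 * k + 3) = pvFib (8 * k + 1) + pvFib (8 * k + 2) := by
      rw [pvFib_step (8 * k + 3) (8 * k + 1) (by omega), show 8 * k + 1 + 1 = 8 * k + 2 from by omega]
    have p1 := pvFib_pos' (8 * k + 1) (by omega)
    have p2 := pvFib_pos' (8 * k + 2) (by omega)
    have hp : (10 : Int) ^ (k + 1) = 10 * 10 ^ k := by ring
    rw [show 8 * (k + 1) + 1 = 8 * k + 9 from by omega, show 8 * (k + 1) + 2 = 8 * k + 10 from by omega, hp]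
    omega

-- Exact decimal length of Nat.toDigits (Mathlib only has the upper bound).
theorem pvToDigitsCore_len (f : Nat) : ∀ (n : Nat) (l : List Char), n < f →
    (Nat.toDigitsCore 10 f n l).length = Nat.log 10 n + 1 + l.length := by
  induction f with
  | zero => intro n l h; omega
  | succ f ih =>
    intro n l _h
    show (if n / 10 = 0 then (n % 10).digitChar :: l
          else Nat.toDigitsCore 10 f (n / 10) ((n % 10).digitChar :: l)).length = _
    by_cases h10 : n / 10 = 0
    · have hn : n < 10 := by omega
      rw [if_pos h10]
      simp only [List.length_cons, Nat.log_eq_zero_iff.mpr (Or.inl hn)]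
      omega
    · have hn10 : 10 ≤ n := by omega
      have hlt : n / 10 < f := by omega
      rw [if_neg h10, ih (n / 10) ((n % 10).digitChar :: l) hlt]
      have hld := Nat.log_div_base 10 n
      have hpos : 0 < Nat.log 10 n := Nat.log_pos (by norm_num) hn10
      simp only [List.length_cons]
      omega

theorem pvToDigits_len (n : Nat) : (Nat.toDigits 10 n).length = Nat.log 10 n + 1 :=
  by simpa using pvToDigitsCore_len (n + 1) n [] (by omega)

-- len(str(m)) = x  ↔  10^(x-1) ≤ m < 10^x, for m ≥ 1 and x ≥ 1.
theorem pvLenStr_eq_iff (m x : Int) (hm : 1 ≤ m) (hx : 1 ≤ x) :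
    (PySem.Str.len (PySem.Int.toStr m) = x) ↔
      ((10 : Int) ^ (x - 1).toNat ≤ m ∧ m < 10 * (10 : Int) ^ (x - 1).toNat) := by
  have hneg : ¬ m < 0 := by omega
  have hchars : PySem.Int.toChars m = Nat.toDigits 10 m.toNat := by
    simp [PySem.Int.toChars, hneg]
  rw [PySem.Str.len_eq, PySem.Int.toList_toStr, hchars, pvToDigits_len]
  have hM : m.toNat ≠ 0 := by omega
  have hmm : ((m.toNat : Int)) = m := by omega
  constructor
  · intro h
    have hlog : Nat.log 10 m.toNat = (x - 1).toNat := by omega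
    have h1 := Nat.pow_log_le_self 10 hM
    have h2 := Nat.lt_pow_succ_log_self (b := 10) (by norm_num) m.toNat
    rw [hlog] at h1 h2
    constructor
    · calc (10 : Int) ^ (x - 1).toNat = ((10 ^ (x - 1).toNat : Nat) : Int) := by push_cast; ring
        _ ≤ (m.toNat : Int) := by exact_mod_cast h1
        _ = m := hmm
    · calc m = (m.toNat : Int) := hmm.symm
        _ < ((10 ^ ((x - 1).toNat + 1) : Nat) : Int) := by exact_mod_cast h2
        _ = 10 * (10 : Int) ^ (x - 1).toNat := by push_cast; ring
  · rintro ⟨h1, h2⟩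
    have hc1 : ((10 ^ (x - 1).toNat : Nat) : Int) = (10 : Int) ^ (x - 1).toNat := by push_cast; ring
    have hc2 : ((10 ^ ((x - 1).toNat + 1) : Nat) : Int) = 10 * (10 : Int) ^ (x - 1).toNat := by push_cast; ring
    have h1' : (10 : Nat) ^ (x - 1).toNat ≤ m.toNat := by
      have : ((10 ^ (x - 1).toNat : Nat) : Int) ≤ (m.toNat : Int) := by rw [hc1, hmm]; exact h1
      exact_mod_cast this
    have h2' : m.toNat < (10 : Nat) ^ ((x - 1).toNat + 1) := by
      have : ((m.toNat : Int)) < ((10 ^ ((x - 1).toNat + 1) : Nat) : Int) := by rw [hc2, hmm]; exact h2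
      exact_mod_cast this
    have hlog : Nat.log 10 m.toNat = (x - 1).toNat :=
      (Nat.log_eq_iff (Or.inr ⟨by norm_num, hM⟩)).mpr ⟨h1', h2'⟩
    omega

theorem pvFind_ge_three (t : Int) (hex : ∃ n, t ≤ pvFib n) (ht10 : 10 ≤ t) : 3 ≤ Nat.find hex := by
  by_contra h
  have hs := Nat.find_spec hex
  have h0 : pvFib 0 = 0 := rfl
  have h1 : pvFib 1 = 1 := rfl
  have h2 : pvFib 2 = 1 := rfl
  have hc : Nat.find hex = 0 ∨ Nat.find hex = 1 ∨ Nat.find hex = 2 := by omega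
  rcases hc with h' | h' | h' <;> rw [h'] at hs <;> omega

-- A's loop reaches the first index whose Fibonacci number passes the digit test.
theorem pvLoopA_eq (x t : Int) (hx : 2 ≤ x) (htdef : t = (10 : Int) ^ (x - 1).toNat)
    (hex : ∃ n, t ≤ pvFib n) :
    ∀ (fuel m : Nat), 1 ≤ m → m + 2 ≤ Nat.find hex → Nat.find hex - (m + 1) ≤ 3 * fuel →
      pvLoopA fuel x (pvFib m) (pvFib (m + 1)) ((m : Int) + 1) = (Nat.find hex : Int) := by
  have ht10 : 10 ≤ t := by
    rw [htdef]
    calc (10 : Int) = 10 ^ 1 := by ring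
      _ ≤ 10 ^ (x - 1).toNat := by
          apply pow_le_pow_right₀ (by norm_num)
          omega
  have hN := Nat.find_spec hex
  have hN3' := pvFind_ge_three t hex ht10
  set N := Nat.find hex with hNdef
  have hN3 : 3 ≤ N := hN3'
  have hNup : pvFib N < 10 * t := by
    have he : N = (N - 2) + 2 := by omega
    have h1 : pvFib (N - 2) < t := by
      have := Nat.find_min hex (m := N - 2) (by omega)
      omega
    have h2 : pvFib (N - 2 + 1) < t := by
      have := Nat.find_min hex (m := N - 2 + 1) (by omega)
      omega
    rw [he, pvFib_add_two]
    omega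
  have hcond : ∀ k : Nat, 1 ≤ k → k ≤ N →
      ((PySem.Str.len (PySem.Int.toStr (pvFib k)) = x) ↔ k = N) := by
    intro k hk1 hkN
    rw [pvLenStr_eq_iff (pvFib k) x (pvFib_pos' k hk1) (by omega), ← htdef]
    constructor
    · rintro ⟨h1, _⟩
      have := Nat.find_le (h := hex) h1
      omega
    · rintro rfl
      exact ⟨hN, hNup⟩
  intro fuel
  induction fuel with
  | zero => intro m _ h1 h2; omega
  | succ f ih =>
    intro m hm1 hle hfuel
    show (if PySem.Str.len (PySem.Int.toStr (pvFib m + pvFib (m + 1))) = x then (m : Int) + 1 + 1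
          else if PySem.Str.len (PySem.Int.toStr (pvFib (m + 1) + (pvFib m + pvFib (m + 1)))) = x then (m : Int) + 1 + 1 + 1
          else if PySem.Str.len (PySem.Int.toStr (pvFib m + pvFib (m + 1) + (pvFib (m + 1) + (pvFib m + pvFib (m + 1))))) = x then (m : Int) + 1 + 1 + 1 + 1
          else pvLoopA f x (pvFib (m + 1) + (pvFib m + pvFib (m + 1))) (pvFib m + pvFib (m + 1) + (pvFib (m + 1) + (pvFib m + pvFib (m + 1)))) ((m : Int) + 1 + 1 + 1 + 1)) = (N : Int)
    have e2 : pvFib m + pvFib (m + 1) = pvFib (m + 2) := (pvFib_add_two m).symm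
    have e3 : pvFib (m + 1) + pvFib (m + 2) = pvFib (m + 3) := (pvFib_add_two (m + 1)).symm
    have e4 : pvFib (m + 2) + pvFib (m + 3) = pvFib (m + 4) := (pvFib_add_two (m + 2)).symm
    rw [e2]
    by_cases hc2 : PySem.Str.len (PySem.Int.toStr (pvFib (m + 2))) = x
    · rw [if_pos hc2]
      have : m + 2 = N := (hcond (m + 2) (by omega) hle).mp hc2
      rw [← this]; push_cast; ring
    · rw [if_neg hc2]
      have hne2 : m + 2 ≠ N := fun h => hc2 ((hcond (m + 2) (by omega) hle).mpr h)
      have hlt2 : m + 2 < N := by omega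
      rw [e3]
      by_cases hc3 : PySem.Str.len (PySem.Int.toStr (pvFib (m + 3))) = x
      · rw [if_pos hc3]
        have : m + 3 = N := (hcond (m + 3) (by omega) (by omega)).mp hc3
        rw [← this]; push_cast; ring
      · rw [if_neg hc3]
        have hne3 : m + 3 ≠ N := fun h => hc3 ((hcond (m + 3) (by omega) (by omega)).mpr h)
        have hlt3 : m + 3 < N := by omega
        rw [e4]
        by_cases hc4 : PySem.Str.len (PySem.Int.toStr (pvFib (m + 4))) = x
        · rw [if_pos hc4]
          have : m + 4 = N := (hcond (m + 4) (by omega) (by omega)).mp hc4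
          rw [← this]; push_cast; ring
        · rw [if_neg hc4]
          have hne4 : m + 4 ≠ N := fun h => hc4 ((hcond (m + 4) (by omega) (by omega)).mpr h)
          have hlt4 : m + 4 < N := by omega
          have hrec := ih (m + 3) (by omega) (by omega) (by omega)
          have em3 : ((m + 3 : Nat) : Int) + 1 = (m : Int) + 1 + 1 + 1 + 1 := by push_cast; ring
          have em31 : (m + 3) + 1 = m + 4 := by omega
          rw [em3, em31] at hrec
          exact hrec

-- fast doubling computes (F(n), F(n+1)) whenever the fuel covers n.
theorem pvFibPair_eq : ∀ (fuel n : Nat), n < fuel → pvFibPair fuel n = (pvFib n, pvFib (n + 1)) := by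
  intro fuel
  induction fuel with
  | zero => intro n h; omega
  | succ f ih =>
    intro n hn
    show (if n = 0 then ((0 : Int), (1 : Int)) else _) = _
    by_cases h0 : n = 0
    · subst h0; rw [if_pos rfl]; rfl
    · rw [if_neg h0]
      have hrec := ih (n / 2) (by omega)
      simp only [hrec]
      set m := n / 2 with hm
      have hfa : pvFib m = (Nat.fib m : Int) := pvFib_eq_fib m
      have hfb : pvFib (m + 1) = (Nat.fib (m + 1) : Int) := pvFib_eq_fib (m + 1)
      have hmono : Nat.fib m ≤ Nat.fib (m + 1) := Nat.fib_mono (by omega)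
      have hc : pvFib m * (2 * pvFib (m + 1) - pvFib m) = pvFib (2 * m) := by
        rw [hfa, hfb, pvFib_eq_fib (2 * m), Nat.fib_two_mul]
        have : (↑(Nat.fib m * (2 * Nat.fib (m + 1) - Nat.fib m)) : Int)
            = (Nat.fib m : Int) * (2 * (Nat.fib (m + 1) : Int) - (Nat.fib m : Int)) := by
          push_cast [Nat.sub_add_cancel]
          rw [Int.natCast_sub (by omega)]
          push_cast; ring
        rw [this]
      have hd : pvFib m * pvFib m + pvFib (m + 1) * pvFib (m + 1) = pvFib (2 * m + 1) := by
        rw [hfa, hfb, pvFib_eq_fib (2 * m + 1), Nat.fib_two_mul_add_one]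
        push_cast; ring
      by_cases hpar : n % 2 = 1
      · rw [if_pos hpar]
        have hn2 : n = 2 * m + 1 := by omega
        have hsum : pvFib (2 * m) + pvFib (2 * m + 1) = pvFib (2 * m + 2) := (pvFib_add_two (2 * m)).symm
        rw [hn2]
        refine Prod.ext ?_ ?_
        · simpa using hd
        · show pvFib m * (2 * pvFib (m + 1) - pvFib m) + (pvFib m * pvFib m + pvFib (m + 1) * pvFib (m + 1)) = pvFib (2 * m + 1 + 1)
          rw [hc, hd, show 2 * m + 1 + 1 = 2 * m + 2 from rfl, ← hsum]
      · rw [if_neg hpar]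
        have hn2 : n = 2 * m := by omega
        rw [hn2]
        exact Prod.ext (by simpa using hc) (by simpa using hd)

-- the doubling loop reaches an index whose Fibonacci number passes the threshold.
theorem pvGrow_ge (t : Int) : ∀ (fuel hi : Nat), t ≤ pvFib (2 ^ fuel * hi) → t ≤ pvFib (pvGrow fuel t hi) := by
  intro fuel
  induction fuel with
  | zero => intro hi h; simpa using h
  | succ f ih =>
    intro hi h
    show t ≤ pvFib (if (pvFibPair (hi + 1) hi).1 < t then pvGrow f t (2 * hi) else hi)
    rw [pvFibPair_eq (hi + 1) hi (by omega)]
    by_cases hlt : pvFib hi < t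
    · rw [if_pos (by simpa using hlt)]
      apply ih
      have : 2 ^ f * (2 * hi) = 2 ^ (f + 1) * hi := by ring
      rw [this]; exact h
    · rw [if_neg (by simpa using hlt)]
      omega

-- binary search returns the least index reaching the threshold.
theorem pvBsearch_eq (t : Int) (hex : ∃ n, t ≤ pvFib n) :
    ∀ (fuel lo hi : Nat), hi - lo < fuel → lo ≤ Nat.find hex → Nat.find hex ≤ hi →
      pvBsearch fuel t lo hi = Nat.find hex := by
  have hiff : ∀ n, t ≤ pvFib n ↔ Nat.find hex ≤ n := by
    intro n
    constructor
    · intro h; exact Nat.find_le h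
    · intro h
      calc t ≤ pvFib (Nat.find hex) := Nat.find_spec hex
        _ ≤ pvFib n := pvFib_mono h
  intro fuel
  induction fuel with
  | zero => intro lo hi h _ _; omega
  | succ f ih =>
    intro lo hi hfuel hlo hhi
    show (if lo < hi then
        if (pvFibPair ((lo + hi) / 2 + 1) ((lo + hi) / 2)).1 < t then pvBsearch f t ((lo + hi) / 2 + 1) hi
        else pvBsearch f t lo ((lo + hi) / 2)
      else lo) = Nat.find hex
    by_cases hlh : lo < hi
    · rw [if_pos hlh, pvFibPair_eq _ _ (by omega)]
      set mid := (lo + hi) / 2 with hmid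
      by_cases hc : pvFib mid < t
      · rw [if_pos (by simpa using hc)]
        have hNm : mid < Nat.find hex := by
          by_contra hge
          have := (hiff mid).mpr (by omega)
          omega
        exact ih (mid + 1) hi (by omega) (by omega) hhi
      · rw [if_neg (by simpa using hc)]
        have hNm : Nat.find hex ≤ mid := (hiff mid).mp (by omega)
        exact ih lo mid (by omega) hlo hNm
    · rw [if_neg hlh]
      omega

-- Both entry points compute the first index N reaching 10^(x-1).
theorem pv_altB (x : Int) (hx : 1 ≤ x) :
    ∃ hex : ∃ n, (10 : Int) ^ (x - 1).toNat ≤ pvFib n,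
      x_digit_fib_number_alt x = (Nat.find hex : Int) := by
  set t := (10 : Int) ^ (x - 1).toNat with ht
  have hex : ∃ n, t ≤ pvFib n :=
    ⟨8 * (x - 1).toNat + 1, (pvFib_growth (x - 1).toNat).1⟩
  refine ⟨hex, ?_⟩
  have hgrow : t ≤ pvFib (pvGrow (x.toNat + 4) t 1) := by
    apply pvGrow_ge
    have hle : 8 * (x - 1).toNat + 1 ≤ 2 ^ (x.toNat + 4) * 1 := by
      have h1 : (x - 1).toNat < 2 ^ (x - 1).toNat := Nat.lt_two_pow_self
      have h2 : (2 : Nat) ^ (x - 1).toNat * 2 ^ 5 ≤ 2 ^ (x.toNat + 4) := by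
        rw [← pow_add]
        apply Nat.pow_le_pow_right (by norm_num)
        omega
      nlinarith [h1, Nat.one_le_two_pow (n := (x-1).toNat)]
    calc t ≤ pvFib (8 * (x - 1).toNat + 1) := (pvFib_growth (x - 1).toNat).1
      _ ≤ pvFib (2 ^ (x.toNat + 4) * 1) := pvFib_mono hle
  have hNhi : Nat.find hex ≤ pvGrow (x.toNat + 4) t 1 := Nat.find_le hgrow
  show ((pvBsearch (pvGrow (x.toNat + 4) t 1 + 1) t 0 (pvGrow (x.toNat + 4) t 1) : Nat) : Int) = _
  rw [pvBsearch_eq t hex _ 0 _ (by omega) (by omega) hNhi]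

theorem pv_main (x : Int) (hx : 2 ≤ x) : x_digit_fib_number x = x_digit_fib_number_alt x := by
  obtain ⟨hex, hB⟩ := pv_altB x (by omega)
  have ht10 : (10 : Int) ≤ 10 ^ (x - 1).toNat := by
    calc (10 : Int) = 10 ^ 1 := by ring
      _ ≤ 10 ^ (x - 1).toNat := by
          apply pow_le_pow_right₀ (by norm_num)
          omega
  have hN3 := pvFind_ge_three _ hex ht10
  have hNb : Nat.find hex ≤ 8 * (x - 1).toNat + 1 :=
    Nat.find_le (pvFib_growth (x - 1).toNat).1
  have hA : x_digit_fib_number x = (Nat.find hex : Int) := by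
    have := pvLoopA_eq x ((10 : Int) ^ (x - 1).toNat) hx rfl hex (3 * x.toNat + 1) 1 (by omega)
      (by omega) (by omega)
    have hf1 : pvFib 1 = 1 := rfl
    have hf2 : pvFib (1 + 1) = 1 := rfl
    rw [hf1, hf2, show ((1 : Nat) : Int) + 1 = 2 from by norm_num] at this
    exact this
  rw [hA, hB]

-- ===== VERDICT (by name: the statement is the Claim_ definition above) =====
theorem x_digit_fib_number_spec : Claim_unchanged_x_digit_fib_number := by
  intro x _ hpre hd
  have hx2 : 2 ≤ x := by
    unfold Pre_x_digit_fib_number at hpre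
    unfold D_x_digit_fib_number at hd
    omega
  unfold Spec_x_digit_fib_number at *
  exact pv_main x hx2

theorem x_digit_fib_number_changed : Claim_changed_x_digit_fib_number := by
  unfold Claim_changed_x_digit_fib_number; decide

theorem x_digit_fib_number_tight : Claim_exact_x_digit_fib_number := by
  intro x _ _ hd
  unfold D_x_digit_fib_number at hd
  subst hd
  decide
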